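-- pv_equiv track=rewrite | github.com/nikhilmitrax/ace-jump-sublime | ace_jump.py | sort_double_char_labels
-- ===== SOURCE A (Python) =====
-- def sort_double_char_labels(labels):
--     """Sort double char labels based on the order of repeated, lower and other labels"""
--     repeated_char_labels = [label for label in labels if label[0] == label[1]]
--
--     lower_char_labels = [label for label in labels
--                          if label[0].islower() and label[1].islower()
--                          and label not in repeated_char_labels]
--
--     other_labels = [label for label in labels
--                     if label not in repeated_char_labels and label not in lower_char_labels]
--
--     labels = repeated_char_labels + lower_char_labels + other_labels
--
--     return labels
-- ===== SOURCE B (Python) =====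
-- def sort_double_char_labels(labels):
--     """Sort double char labels based on the order of repeated, lower and other labels"""
--     repeated, lower, other = [], [], []
--     for label in labels:
--         if label[0] == label[1]:
--             repeated.append(label)
--         elif label[0].islower() and label[1].islower():
--             lower.append(label)
--         else:
--             other.append(label)
--     return repeated + lower + other
-- ===== Notes on version B (the rewrite author's own statement) =====
-- stated objective: simpler
-- what changed: Replaces A's three filtering passes with 'label not in <previous bucket>' list-membership scans by a single pass that classifies each label once into one of three buckets and concatenates them.
import Mathlib
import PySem

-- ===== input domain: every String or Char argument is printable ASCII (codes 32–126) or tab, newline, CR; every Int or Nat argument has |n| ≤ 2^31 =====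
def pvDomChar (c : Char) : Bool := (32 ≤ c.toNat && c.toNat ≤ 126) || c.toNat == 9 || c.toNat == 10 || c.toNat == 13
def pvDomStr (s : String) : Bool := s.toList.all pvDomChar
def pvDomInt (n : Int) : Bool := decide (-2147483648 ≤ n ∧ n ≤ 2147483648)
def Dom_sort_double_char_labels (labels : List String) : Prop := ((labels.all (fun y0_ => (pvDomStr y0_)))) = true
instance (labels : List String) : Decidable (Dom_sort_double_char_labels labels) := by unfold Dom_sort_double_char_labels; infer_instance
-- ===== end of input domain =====

-- B replaces A's three filtering passes with list-membership tests by one pass that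
-- classifies each label once into one of three buckets; objective: simpler.

-- ===== PORT A =====
def sort_double_char_labels (labels : List String) : List String :=
  let repeated_char_labels := labels.filter (fun label =>
    PySem.Str.pyGet? label 0 == PySem.Str.pyGet? label 1)
  let lower_char_labels := labels.filter (fun label =>
    ((PySem.Str.pyGet? label 0).map PySem.Chars.islower).getD false &&
    ((PySem.Str.pyGet? label 1).map PySem.Chars.islower).getD false &&
    !(repeated_char_labels.contains label))
  let other_labels := labels.filter (fun label =>
    !(repeated_char_labels.contains label) && !(lower_char_labels.contains label))
  repeated_char_labels ++ lower_char_labels ++ other_labels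

-- ===== PORT B =====
-- one step of B's loop: append the label to the bucket its first two chars select
def altStep (acc : List String × List String × List String) (label : String) :
    List String × List String × List String :=
  match label.toList with
  | c0 :: c1 :: _ =>
    if c0 == c1 then (acc.1 ++ [label], acc.2.1, acc.2.2)
    else if PySem.Chars.islower c0 && PySem.Chars.islower c1 then
      (acc.1, acc.2.1 ++ [label], acc.2.2)
    else (acc.1, acc.2.1, acc.2.2 ++ [label])
  | _ => (acc.1, acc.2.1, acc.2.2 ++ [label])

def sort_double_char_labels_alt (labels : List String) : List String :=
  let t := labels.foldl altStep ([], [], [])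
  t.1 ++ t.2.1 ++ t.2.2

-- ===== PRECONDITION & SPEC =====
-- A indexes label[0] and label[1]; a label shorter than 2 chars raises IndexError.
def Pre_sort_double_char_labels (labels : List String) : Prop :=
  ∀ label ∈ labels, 2 ≤ label.toList.length
instance (labels : List String) : Decidable (Pre_sort_double_char_labels labels) := by
  unfold Pre_sort_double_char_labels; infer_instance
def pvWitness_sort_double_char_labels : List String := ["aa", "ab", "AB", "a1"]

def Spec_sort_double_char_labels (labels : List String) (out : List String) : Prop := out = sort_double_char_labels_alt labels
instance (labels : List String) (out : List String) : Decidable (Spec_sort_double_char_labels labels out) := by unfold Spec_sort_double_char_labels; infer_instance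

-- ===== CLAIM (what is proved, stated in full; the proofs are below) =====
def Claim_equal_sort_double_char_labels : Prop := ∀ (labels : List String), Dom_sort_double_char_labels labels → Pre_sort_double_char_labels labels → Spec_sort_double_char_labels labels (sort_double_char_labels labels)

-- ===== LEMMAS AND PROOFS =====

-- the three classifying predicates, on the string's character list
def keyRep (s : String) : Bool :=
  match s.toList with
  | c0 :: c1 :: _ => c0 == c1
  | _ => false

def keyLow (s : String) : Bool :=
  match s.toList with
  | c0 :: c1 :: _ => PySem.Chars.islower c0 && PySem.Chars.islower c1 && !(c0 == c1)
  | _ => false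

def keyOther (s : String) : Bool :=
  match s.toList with
  | c0 :: c1 :: _ => !(c0 == c1) && !(PySem.Chars.islower c0 && PySem.Chars.islower c1)
  | _ => true

lemma altStep_foldl (ls : List String) (a b c : List String) :
    ls.foldl altStep (a, b, c) =
      (a ++ ls.filter keyRep, b ++ ls.filter keyLow, c ++ ls.filter keyOther) := by
  induction ls generalizing a b c with
  | nil => simp
  | cons s t ih =>
    simp only [List.foldl_cons, List.filter_cons]
    rcases h : s.toList with _ | ⟨c0, rest⟩
    · simp [altStep, keyRep, keyLow, keyOther, h, ih]
    · rcases rest with _ | ⟨c1, r⟩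
      · simp [altStep, keyRep, keyLow, keyOther, h, ih]
      · by_cases h01 : (c0 == c1) = true
        · simp [altStep, keyRep, keyLow, keyOther, h, h01, ih]
        · by_cases hlw : (PySem.Chars.islower c0 && PySem.Chars.islower c1) = true
          · simp [altStep, keyRep, keyLow, keyOther, h, h01, hlw, ih, Bool.and_comm]
          · simp [altStep, keyRep, keyLow, keyOther, h, h01, hlw, ih]

lemma alt_eq_filters (labels : List String) :
    sort_double_char_labels_alt labels =
      labels.filter keyRep ++ labels.filter keyLow ++ labels.filter keyOther := by
  simp [sort_double_char_labels_alt, altStep_foldl]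

lemma contains_filter_of_mem (labels : List String) (p : String → Bool) (s : String)
    (h : s ∈ labels) : (labels.filter p).contains s = p s := by
  by_cases hp : p s = true
  · simp [List.contains_eq_mem, List.mem_filter, h, hp]
  · simp only [Bool.not_eq_true] at hp
    simp [List.contains_eq_mem, List.mem_filter, hp]

-- ===== VERDICT (by name: the statement is the Claim_ definition above) =====
theorem sort_double_char_labels_spec : Claim_equal_sort_double_char_labels := by
  intro labels _ hpre
  unfold Spec_sort_double_char_labels
  rw [alt_eq_filters]
  unfold sort_double_char_labels
  simp only []
  -- rewrite each of A's three filters into the corresponding key filter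
  have hrep : labels.filter (fun label =>
      PySem.Str.pyGet? label 0 == PySem.Str.pyGet? label 1) = labels.filter keyRep := by
    apply List.filter_congr
    intro s hs
    obtain ⟨c0, c1, r, h⟩ : ∃ c0 c1 r, s.toList = c0 :: c1 :: r := by
      have := hpre s hs
      rcases hl : s.toList with _ | ⟨x, _ | ⟨y, t⟩⟩ <;> simp [hl] at this ⊢
    simp [keyRep, h]
  rw [hrep]
  have hlow : labels.filter (fun label =>
      ((PySem.Str.pyGet? label 0).map PySem.Chars.islower).getD false &&
      ((PySem.Str.pyGet? label 1).map PySem.Chars.islower).getD false &&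
      !((labels.filter keyRep).contains label)) = labels.filter keyLow := by
    apply List.filter_congr
    intro s hs
    obtain ⟨c0, c1, r, h⟩ : ∃ c0 c1 r, s.toList = c0 :: c1 :: r := by
      have := hpre s hs
      rcases hl : s.toList with _ | ⟨x, _ | ⟨y, t⟩⟩ <;> simp [hl] at this ⊢
    rw [contains_filter_of_mem labels keyRep s hs]
    simp [keyRep, keyLow, h]
  rw [hlow]
  have hoth : labels.filter (fun label =>
      !((labels.filter keyRep).contains label) && !((labels.filter keyLow).contains label)) =
      labels.filter keyOther := by
    apply List.filter_congr
    intro s hs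
    obtain ⟨c0, c1, r, h⟩ : ∃ c0 c1 r, s.toList = c0 :: c1 :: r := by
      have := hpre s hs
      rcases hl : s.toList with _ | ⟨x, _ | ⟨y, t⟩⟩ <;> simp [hl] at this ⊢
    rw [contains_filter_of_mem labels keyRep s hs, contains_filter_of_mem labels keyLow s hs]
    simp only [keyRep, keyLow, keyOther, h]
    by_cases h01 : (c0 == c1) = true <;>
      by_cases hlw : (PySem.Chars.islower c0 && PySem.Chars.islower c1) = true <;>
        simp [h01, hlw]
  rw [hoth]
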